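-- pv_equiv track=rewrite | github.com/pisterlabs/promptset | data/scraping-2.0/repos/abponcio~QuizAI/quiz.py | create_student_view
-- ===== SOURCE A (Python) =====
-- def create_student_view(quiz, num_questions):
--   student_view = {1: ''}
--   question_number = 1
--
--   for line in quiz.split('\n'):
--     if not line.startswith('Correct answer:'):
--         student_view[question_number] += line + '\n'
--     else:
--         if question_number < num_questions:
--             question_number += 1
--             student_view[question_number] = ''
--
--   return student_view
-- ===== SOURCE B (Python) =====
-- def create_student_view(quiz, num_questions):
--     # Partition the lines into groups separated by 'Correct answer:' lines,
--     # render each group, then number the groups, merging the overflow past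
--     # the question cap into the last entry.
--     groups = []
--     cur = []
--     for line in quiz.split('\n'):
--         if line.startswith('Correct answer:'):
--             groups.append(cur)
--             cur = []
--         else:
--             cur.append(line)
--     groups.append(cur)
--     texts = [''.join(l + '\n' for l in g) for g in groups]
--     k = min(len(texts), max(1, num_questions))
--     view = {i + 1: t for i, t in enumerate(texts[:k - 1])}
--     view[k] = ''.join(texts[k - 1:])
--     return view
-- ===== Notes on version B (the rewrite author's own statement) =====
-- stated objective: alternative
-- what changed: B replaces A's stateful dict-and-question-counter loop by a clean partition: split the lines into groups at 'Correct answer:' separators, render each group once, then number the first groups and join the overflow past the cap into the last entry.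
import Mathlib
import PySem

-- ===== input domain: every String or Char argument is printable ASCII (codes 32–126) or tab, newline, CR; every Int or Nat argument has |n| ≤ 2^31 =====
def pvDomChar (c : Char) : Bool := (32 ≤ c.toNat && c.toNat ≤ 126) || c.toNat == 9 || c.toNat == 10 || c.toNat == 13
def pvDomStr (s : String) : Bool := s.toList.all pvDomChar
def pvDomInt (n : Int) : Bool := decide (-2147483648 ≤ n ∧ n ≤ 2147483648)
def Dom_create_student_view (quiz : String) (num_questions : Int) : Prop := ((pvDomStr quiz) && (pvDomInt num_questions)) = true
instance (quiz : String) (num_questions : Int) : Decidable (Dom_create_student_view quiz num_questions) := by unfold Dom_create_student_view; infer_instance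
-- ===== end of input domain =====

-- B rebuilds the student view by partitioning the lines into groups at the
-- 'Correct answer:' separators instead of A's stateful dict/counter loop
-- (objective: alternative decomposition; same return value).

-- ===== PORT A =====
-- loop body of A (the key st.2 is always present in the dict, so getD's default is never used)
def create_student_view_step (num_questions : Int) (st : PySem.Dict Int String × Int) (line : String) : PySem.Dict Int String × Int :=
  if ¬ (PySem.Str.startswith line "Correct answer:" = true) then
    (st.1.insert st.2 (st.1.getD st.2 "" ++ line ++ "\n"), st.2)
  else if st.2 < num_questions then
    (st.1.insert (st.2 + 1) "", st.2 + 1)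
  else st

def create_student_view (quiz : String) (num_questions : Int) : List (Int × String) :=
  -- student_view = {1: ''}; question_number = 1; for line in quiz.split('\n'): …
  let lines := (PySem.Str.split? quiz "\n").getD []   -- separator "\n" ≠ "", so split? is always `some`
  let fin := lines.foldl (create_student_view_step num_questions) (PySem.Dict.ofList [((1:Int), "")], 1)
  fin.1.items

-- ===== PORT B =====
-- loop body of B: append the line to the current group, or close the group at a separator
def create_student_view_alt_step (st : List (List String) × List String) (line : String) : List (List String) × List String :=
  if PySem.Str.startswith line "Correct answer:" = true then (st.1 ++ [st.2], [])
  else (st.1, st.2 ++ [line])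

def create_student_view_alt (quiz : String) (num_questions : Int) : List (Int × String) :=
  let lines := (PySem.Str.split? quiz "\n").getD []   -- separator "\n" ≠ "", so split? is always `some`
  let st := lines.foldl create_student_view_alt_step ([], [])
  let groups := st.1 ++ [st.2]
  let texts := groups.map (fun g => PySem.Str.join "" (g.map (fun l => l ++ "\n")))
  let k : Int := min (texts.length : Int) (max 1 num_questions)
  -- the dict comprehension inserts the fresh keys 1..k-1 in order, then view[k] appends:
  -- as an association list in insertion order
  (PySem.List.enumerate (PySem.List.slice texts none (some (k - 1)))).map (fun p => (p.1 + 1, p.2))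
    ++ [(k, PySem.Str.join "" (PySem.List.slice texts (some (k - 1)) none))]

-- ===== PRECONDITION & SPEC =====
def Spec_create_student_view (quiz : String) (num_questions : Int) (out : List (Int × String)) : Prop := out = create_student_view_alt quiz num_questions
instance (quiz : String) (num_questions : Int) (out : List (Int × String)) : Decidable (Spec_create_student_view quiz num_questions out) := by unfold Spec_create_student_view; infer_instance

-- ===== CLAIM (what is proved, stated in full; the proofs are below) =====
def Claim_equal_create_student_view : Prop := ∀ (quiz : String) (num_questions : Int), Dom_create_student_view quiz num_questions → Spec_create_student_view quiz num_questions (create_student_view quiz num_questions)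

-- ===== LEMMAS AND PROOFS =====

-- string concatenation facts about ''.join
theorem pv_flatten_intersperse : ∀ (xs : List (List Char)), (List.intersperse ([]:List Char) xs).flatten = xs.flatten
  | [] => rfl
  | [_] => rfl
  | x :: y :: zs => by
      show (x :: [] :: List.intersperse [] (y :: zs)).flatten = _
      rw [List.flatten_cons, List.flatten_cons, pv_flatten_intersperse (y :: zs)]
      simp

-- ''.join xs
def pvJ (xs : List String) : String := PySem.Str.join "" xs
-- rendering of one group: ''.join(l + '\n' for l in g)
def pvR (g : List String) : String := pvJ (g.map (fun l => l ++ "\n"))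

theorem pvJ_nil : pvJ [] = "" := rfl

theorem pvJ_cons (x : String) (xs : List String) : pvJ (x :: xs) = x ++ pvJ xs := by
  simp [pvJ, PySem.Str.join, PySem.Chars.join, List.intercalate, pv_flatten_intersperse]

theorem pvJ_append (xs ys : List String) : pvJ (xs ++ ys) = pvJ xs ++ pvJ ys := by
  induction xs with
  | nil => rw [pvJ_nil, List.nil_append, String.empty_append]
  | cons x xs ih => rw [List.cons_append, pvJ_cons, pvJ_cons, ih, String.append_assoc]

theorem pvJ_single (x : String) : pvJ [x] = x := by
  rw [pvJ_cons, pvJ_nil, String.append_empty]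

theorem pvR_nil : pvR [] = "" := rfl

theorem pvR_append (g : List String) (l : String) : pvR (g ++ [l]) = pvR g ++ (l ++ "\n") := by
  unfold pvR
  rw [List.map_append, pvJ_append, List.map_singleton, pvJ_single]

-- numbering a list of texts with consecutive integer keys
def pvNum : Int → List String → List (Int × String)
  | _, [] => []
  | k, x :: xs => (k, x) :: pvNum (k + 1) xs

theorem pvNum_mem {k : Int} {xs : List String} {p : Int × String} (h : p ∈ pvNum k xs) :
    k ≤ p.1 ∧ p.1 < k + xs.length := by
  induction xs generalizing k with
  | nil => simp [pvNum] at h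
  | cons x xs ih =>
      rw [pvNum, List.mem_cons] at h
      rcases h with h | h
      · subst h; simp
      · have := ih h; simp; omega

theorem pvNum_append (k : Int) (xs : List String) (y : String) :
    pvNum k (xs ++ [y]) = pvNum k xs ++ [(k + xs.length, y)] := by
  induction xs generalizing k with
  | nil => simp [pvNum]
  | cons x xs ih =>
      rw [List.cons_append, pvNum, pvNum, ih, List.cons_append]
      simp
      omega

theorem pvNum_nodup_fst (k : Int) (xs : List String) : ((pvNum k xs).map Prod.fst).Nodup := by
  induction xs generalizing k with
  | nil => simp [pvNum]
  | cons x xs ih =>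
      rw [pvNum, List.map_cons, List.nodup_cons]
      refine ⟨?_, ih (k + 1)⟩
      intro hmem
      rcases List.mem_map.mp hmem with ⟨p, hp, hfst⟩
      have := pvNum_mem hp
      omega

-- the invariant shape: the dict A maintains, expressed from B's fold state
def pvQ (nq : Int) (m : Nat) : Int := min ((m : Int) + 1) (max 1 nq)

def pvEntries (nq : Int) (done : List (List String)) (cur : List String) : List (Int × String) :=
  pvNum 1 ((done.take ((max 1 nq).toNat - 1)).map pvR)
    ++ [(pvQ nq done.length, pvJ ((done.drop ((max 1 nq).toNat - 1)).map pvR) ++ pvR cur)]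

theorem pvPre_lt (nq : Int) (done : List (List String)) (_cur : List String) :
    ∀ p ∈ pvNum 1 ((done.take ((max 1 nq).toNat - 1)).map pvR), p.1 < pvQ nq done.length := by
  intro p hp
  have h := pvNum_mem hp
  have hlen : ((done.take ((max 1 nq).toNat - 1)).map pvR).length
      = min ((max 1 nq).toNat - 1) done.length := by simp
  rw [hlen] at h
  unfold pvQ
  push_cast at h ⊢
  omega

theorem pvEntries_keys_nodup (nq : Int) (done : List (List String)) (cur : List String) :
    ((pvEntries nq done cur).map Prod.fst).Nodup := by
  unfold pvEntries
  rw [List.map_append, List.map_singleton, List.nodup_append]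
  refine ⟨pvNum_nodup_fst 1 _, List.nodup_singleton _, ?_⟩
  intro a ha b hb
  rcases List.mem_map.mp ha with ⟨p, hp, hfst⟩
  have := pvPre_lt nq done cur p hp
  rw [List.mem_singleton] at hb
  subst hb
  omega

-- dict surgery: overwriting the last entry, appending a fresh entry
theorem pvUpd (d : PySem.Dict Int String) (pre : List (Int × String)) (q : Int) (t v : String)
    (hd : d.items = pre ++ [(q, t)]) (hlt : ∀ p ∈ pre, p.1 ≠ q) (hnd : d.keys.Nodup) :
    (d.insert q v).items = pre ++ [(q, v)] ∧ d.getD q "" = t := by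
  have hcont : d.contains q = true := by
    rw [PySem.Dict.contains_eq_decide_mem_keys]
    simp only [PySem.Dict.keys, hd]
    simp
  constructor
  · rw [PySem.Dict.items_insert_of_contains d v hcont, hd, List.map_append]
    congr 1
    · calc pre.map (fun p => if (p.1 == q) = true then (q, v) else p)
          = pre.map id := List.map_congr_left (fun p hp => by simp [hlt p hp])
        _ = pre := List.map_id pre
    · simp
  · exact PySem.Dict.getD_of_mem_items d (by rw [hd]; simp) hnd ""

theorem pvApp (d : PySem.Dict Int String) (q : Int) (v : String)
    (hfresh : ∀ p ∈ d.items, p.1 ≠ q) :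
    (d.insert q v).items = d.items ++ [(q, v)] := by
  have hcont : d.contains q = false := by
    rw [PySem.Dict.contains_eq_decide_mem_keys]
    simp only [PySem.Dict.keys]
    rw [decide_eq_false_iff_not]
    intro hmem
    rcases List.mem_map.mp hmem with ⟨p, hp, hfst⟩
    exact hfresh p hp hfst
  exact PySem.Dict.items_insert_of_not_contains d v hcont

-- closing a group while still below the cap
theorem pvShift_lt (nq : Int) (done : List (List String)) (cur : List String)
    (h : pvQ nq done.length < nq) :
    pvEntries nq done cur ++ [(pvQ nq done.length + 1, "")] = pvEntries nq (done ++ [cur]) [] := by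
  have hm1 : done.length + 1 ≤ (max 1 nq).toNat - 1 := by unfold pvQ at h; omega
  have hq : pvQ nq done.length = (done.length : Int) + 1 := by unfold pvQ at *; omega
  have hq2 : pvQ nq (done ++ [cur]).length = (done.length : Int) + 2 := by
    unfold pvQ at *; simp; omega
  unfold pvEntries
  rw [hq, hq2,
      List.take_of_length_le (l := done) (by omega),
      List.take_of_length_le (l := done ++ [cur]) (by simp; omega),
      List.drop_eq_nil_of_le (as := done) (by omega),
      List.drop_eq_nil_of_le (as := done ++ [cur]) (by simp; omega),
      List.map_append, List.map_singleton, pvNum_append, List.map_nil, pvJ_nil,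
      String.empty_append, pvR_nil, String.append_empty]
  rw [List.length_map, Int.add_comm 1 (done.length : Int),
      show (done.length : Int) + 1 + 1 = (done.length : Int) + 2 from by ring]

-- closing a group at or past the cap: the entries do not move
theorem pvShift_ge (nq : Int) (done : List (List String)) (cur : List String)
    (h : ¬ pvQ nq done.length < nq) :
    pvEntries nq done cur = pvEntries nq (done ++ [cur]) []
      ∧ pvQ nq done.length = pvQ nq (done ++ [cur]).length := by
  have hm : (max 1 nq).toNat - 1 ≤ done.length := by unfold pvQ at h; omega
  have hq1 : pvQ nq done.length = max 1 nq := by unfold pvQ at *; omega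
  have hq2 : pvQ nq (done ++ [cur]).length = max 1 nq := by
    unfold pvQ at *; simp; omega
  refine ⟨?_, by rw [hq1, hq2]⟩
  unfold pvEntries
  rw [hq1, hq2,
      List.take_append_of_le_length (l₁ := done) hm,
      List.drop_append_of_le_length (l₁ := done) hm,
      List.map_append, pvJ_append, List.map_singleton, pvJ_single,
      pvR_nil, String.append_empty]

-- main invariant: A's fold from a dict shaped like pvEntries tracks B's fold
theorem pvInv (nq : Int) (lines : List String) :
    ∀ (done : List (List String)) (cur : List String) (d : PySem.Dict Int String),
    d.items = pvEntries nq done cur →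
    ((lines.foldl (create_student_view_step nq) (d, pvQ nq done.length)).1).items
      = pvEntries nq (lines.foldl create_student_view_alt_step (done, cur)).1
                    (lines.foldl create_student_view_alt_step (done, cur)).2 := by
  induction lines with
  | nil => intro done cur d hd; simpa using hd
  | cons line ls ih =>
      intro done cur d hd
      rw [List.foldl_cons, List.foldl_cons]
      have hnd : d.keys.Nodup := by
        simp only [PySem.Dict.keys, hd]
        exact pvEntries_keys_nodup nq done cur
      by_cases hsep : PySem.Str.startswith line "Correct answer:" = true
      · have eB : create_student_view_alt_step (done, cur) line = (done ++ [cur], []) := by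
          unfold create_student_view_alt_step
          split_ifs
          rfl
        rw [eB]
        by_cases hlt : pvQ nq done.length < nq
        · have eA : create_student_view_step nq (d, pvQ nq done.length) line
              = (d.insert (pvQ nq done.length + 1) "", pvQ nq done.length + 1) := by
            unfold create_student_view_step
            split_ifs
            rfl
          rw [eA]
          have hfresh : ∀ p ∈ d.items, p.1 ≠ pvQ nq done.length + 1 := by
            intro p hp
            rw [hd] at hp
            rcases List.mem_append.mp hp with hp | hp
            · have := pvPre_lt nq done cur p hp
              omega
            · rw [List.mem_singleton] at hp
              subst hp
              simp
          have hins : (d.insert (pvQ nq done.length + 1) "").items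
              = pvEntries nq (done ++ [cur]) [] := by
            rw [pvApp d _ "" hfresh, hd]
            exact pvShift_lt nq done cur hlt
          have hq1 : pvQ nq done.length + 1 = pvQ nq (done ++ [cur]).length := by
            unfold pvQ at *
            simp
            omega
          rw [hq1]
          exact ih (done ++ [cur]) [] _ (by rw [← hq1]; exact hins)
        · have eA : create_student_view_step nq (d, pvQ nq done.length) line
              = (d, pvQ nq done.length) := by
            unfold create_student_view_step
            split_ifs
            rfl
          rw [eA]
          obtain ⟨he, hq⟩ := pvShift_ge nq done cur hlt
          rw [hq]
          exact ih (done ++ [cur]) [] d (by rw [hd, he])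
      · have eB : create_student_view_alt_step (done, cur) line = (done, cur ++ [line]) := by
          unfold create_student_view_alt_step
          split_ifs
          rfl
        rw [eB]
        have eA : create_student_view_step nq (d, pvQ nq done.length) line
            = (d.insert (pvQ nq done.length) (d.getD (pvQ nq done.length) "" ++ line ++ "\n"),
               pvQ nq done.length) := by
          unfold create_student_view_step
          split_ifs
          rfl
        rw [eA]
        obtain ⟨hins, hget⟩ := pvUpd d
          (pvNum 1 ((done.take ((max 1 nq).toNat - 1)).map pvR))
          (pvQ nq done.length)
          (pvJ ((done.drop ((max 1 nq).toNat - 1)).map pvR) ++ pvR cur)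
          (d.getD (pvQ nq done.length) "" ++ line ++ "\n")
          (by rw [hd]; rfl)
          (fun p hp => by have := pvPre_lt nq done cur p hp; omega)
          hnd
        apply ih done (cur ++ [line])
        rw [hins, hget]
        unfold pvEntries
        rw [pvR_append, String.append_assoc, String.append_assoc]

-- enumerate followed by the +1 re-keying is the consecutive numbering
theorem pvEnumMap (xs : List String) (s : Int) :
    (PySem.List.enumerate xs s).map (fun p => (p.1 + 1, p.2)) = pvNum (s + 1) xs := by
  induction xs generalizing s with
  | nil => simp [PySem.List.enumerate, pvNum]
  | cons x xs ih => rw [show PySem.List.enumerate (x :: xs) s = (s, x) :: PySem.List.enumerate xs (s + 1) from rfl,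
      List.map_cons, ih, pvNum]

-- B's final assembly equals the invariant shape at B's final fold state
theorem pvOut (nq : Int) (done : List (List String)) (cur : List String) :
    (PySem.List.enumerate (PySem.List.slice ((done ++ [cur]).map pvR) none
        (some (min (((done ++ [cur]).map pvR).length : Int) (max 1 nq) - 1)))).map (fun p => (p.1 + 1, p.2))
      ++ [(min (((done ++ [cur]).map pvR).length : Int) (max 1 nq),
           pvJ (PySem.List.slice ((done ++ [cur]).map pvR)
             (some (min (((done ++ [cur]).map pvR).length : Int) (max 1 nq) - 1)) none))]
    = pvEntries nq done cur := by
  have hlen : ((done ++ [cur]).map pvR).length = done.length + 1 := by simp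
  have hk : min (((done ++ [cur]).map pvR).length : Int) (max 1 nq) = pvQ nq done.length := by
    rw [hlen]; unfold pvQ; push_cast; ring_nf
  have hk1 : (0:Int) ≤ pvQ nq done.length - 1 := by unfold pvQ; omega
  have htonat : (pvQ nq done.length - 1).toNat = min done.length ((max 1 nq).toNat - 1) := by
    unfold pvQ; omega
  rw [hk, PySem.List.slice_to _ hk1, PySem.List.slice_from _ hk1, htonat,
      List.map_append, List.map_singleton, pvEnumMap]
  unfold pvEntries
  by_cases hc : (max 1 nq).toNat - 1 ≤ done.length
  · have hmin : min done.length ((max 1 nq).toNat - 1) = (max 1 nq).toNat - 1 := by omega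
    have hlen' : (max 1 nq).toNat - 1 ≤ (done.map pvR).length := by simpa using hc
    rw [hmin, List.take_append_of_le_length hlen', List.drop_append_of_le_length hlen',
        pvJ_append, pvJ_single, ← List.map_take, ← List.map_drop, zero_add]
  · have hmin : min done.length ((max 1 nq).toNat - 1) = done.length := by omega
    have hlen' : done.length ≤ (done.map pvR).length := by simp
    rw [hmin, List.take_append_of_le_length hlen', List.drop_append_of_le_length hlen']
    rw [show List.take done.length (done.map pvR) = done.map pvR from by
          apply List.take_of_length_le; simp,
        show List.drop done.length (done.map pvR) = ([] : List String) from by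
          apply List.drop_eq_nil_of_le; simp,
        List.nil_append, pvJ_single]
    rw [List.take_of_length_le (l := done) (by omega),
        List.drop_eq_nil_of_le (as := done) (by omega),
        List.map_nil, pvJ_nil, String.empty_append, zero_add]

-- ===== VERDICT (by name: the statement is the Claim_ definition above) =====
theorem create_student_view_spec : Claim_equal_create_student_view := by
  unfold Claim_equal_create_student_view
  intro quiz nq _hdom
  unfold Spec_create_student_view
  have hinit : (PySem.Dict.ofList [((1:Int), "")]).items = pvEntries nq [] [] := by
    unfold pvEntries pvQ
    simp [pvNum, pvJ_nil, pvR_nil]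
    rfl
  have hA := pvInv nq ((PySem.Str.split? quiz "\n").getD []) [] []
      (PySem.Dict.ofList [((1:Int), "")]) hinit
  simp only [List.length_nil] at hA
  rw [show pvQ nq 0 = 1 from by unfold pvQ; omega] at hA
  exact hA.trans (pvOut nq _ _).symm
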